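-- pv_equiv track=rewrite | github.com/ztl-35/-DEMO | Test_GUI.py | predict_dict
-- ===== SOURCE A (Python) =====
-- def predict_dict(sentence, predict_tag_array):
--     # 将预测的标签转化为字典，用于GUI中显示
--     predict_tag_dict = {}
--     index = 0
--
--     while index != len(sentence):
--         if predict_tag_array[index] == 0:
--             index += 1
--             continue
--         else:
--             tag = predict_tag_array[index]
--             temp_word = ''
--             index1 = index
--             while index1 != len(sentence):
--                 if tag != predict_tag_array[index1]:
--                     index = index1
--                     break
--                 else:
--                     temp_word = temp_word + sentence[index1]
--                     index1 += 1
--                     if index1 == len(sentence):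
--                         index = index1
--             predict_tag_dict[len(predict_tag_dict)] = {temp_word: tag}
--     return predict_tag_dict
-- ===== SOURCE B (Python) =====
-- def predict_dict(sentence, predict_tag_array):
--     # One pass with a look-ahead run-end test: emit a slice per non-zero run.
--     result = {}
--     start = 0
--     n = len(sentence)
--     for i in range(n):
--         t = predict_tag_array[i]
--         if i + 1 == n or predict_tag_array[i + 1] != t:
--             if t != 0:
--                 result[len(result)] = {sentence[start:i + 1]: t}
--             start = i + 1
--     return result
-- ===== Notes on version B (the rewrite author's own statement) =====
-- stated objective: simpler
-- what changed: Replaced A's nested while-loops that rebuild each word character by character with a single for-loop over the indices using a look-ahead run-end test and one string slice per non-zero run.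
import Mathlib
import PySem

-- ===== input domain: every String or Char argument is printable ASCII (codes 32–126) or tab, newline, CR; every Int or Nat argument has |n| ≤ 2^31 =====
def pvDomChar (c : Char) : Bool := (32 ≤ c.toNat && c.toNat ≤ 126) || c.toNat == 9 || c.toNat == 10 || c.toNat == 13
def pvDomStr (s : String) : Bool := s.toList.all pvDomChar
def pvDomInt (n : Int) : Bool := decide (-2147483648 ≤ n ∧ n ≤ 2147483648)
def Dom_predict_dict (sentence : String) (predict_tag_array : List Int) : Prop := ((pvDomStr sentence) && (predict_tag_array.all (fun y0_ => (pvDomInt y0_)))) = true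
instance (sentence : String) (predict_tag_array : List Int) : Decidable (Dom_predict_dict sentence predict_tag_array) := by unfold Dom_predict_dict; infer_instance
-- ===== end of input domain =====

-- B is a single pass with a look-ahead run-end test and one slice per run, instead of A's
-- nested while-loops that rebuild each word character by character (objective: simpler).

-- ===== PORT A =====
-- inner while loop of A: accumulates temp_word, returns (temp_word, new index).
-- fuel only guards totality (the loop advances index1 by 1 each iteration); on the
-- excluded IndexError inputs (pyGet? = none) it returns the current state, unreachable under Pre_.
def pdInner (s : List Char) (ts : List Int) (tag : Int) : Nat → List Char → Nat → List Char × Nat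
  | 0, tw, i1 => (tw, i1)
  | fuel + 1, tw, i1 =>
    if i1 = s.length then (tw, i1)
    else
      match PySem.List.pyGet? ts (i1 : Int) with
      | none => (tw, i1)  -- IndexError in Python; excluded by Pre_
      | some t =>
        if tag ≠ t then (tw, i1)
        else pdInner s ts tag fuel (tw ++ [PySem.List.pyGetD s (i1 : Int) ' ']) (i1 + 1)

-- outer while loop of A (fuel guards totality; index strictly increases each iteration)
def pdOuter (s : List Char) (ts : List Int) : Nat → List (Int × List (String × Int)) → Nat → List (Int × List (String × Int))
  | 0, d, _ => d
  | fuel + 1, d, i =>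
    if i = s.length then d
    else
      match PySem.List.pyGet? ts (i : Int) with
      | none => d  -- IndexError in Python; excluded by Pre_
      | some t =>
        if t = 0 then pdOuter s ts fuel d (i + 1)
        else
          let r := pdInner s ts t (s.length + 1) [] i
          pdOuter s ts fuel (d ++ [((d.length : Int), [(String.ofList r.1, t)])]) r.2

def predict_dict (sentence : String) (predict_tag_array : List Int) : List (Int × List (String × Int)) :=
  pdOuter sentence.toList predict_tag_array (sentence.toList.length + 1) [] 0

-- ===== PORT B =====
-- loop body of Source B: state = (result, start); pyGetD is in range under Pre_
def pdStep (s : List Char) (ts : List Int) (acc : List (Int × List (String × Int)) × Nat) (i : Nat) : List (Int × List (String × Int)) × Nat :=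
  let t := PySem.List.pyGetD ts (i : Int) 0
  if i + 1 = s.length ∨ PySem.List.pyGetD ts ((i : Int) + 1) 0 ≠ t then
    (if t ≠ 0 then
       acc.1 ++ [((acc.1.length : Int), [(String.ofList (PySem.List.slice s (some (acc.2 : Int)) (some ((i : Int) + 1))), t)])]
     else acc.1, i + 1)
  else acc

def predict_dict_alt (sentence : String) (predict_tag_array : List Int) : List (Int × List (String × Int)) :=
  (((List.range sentence.toList.length).foldl (pdStep sentence.toList predict_tag_array) ([], 0))).1

-- ===== PRECONDITION & SPEC =====
-- Pre_ excludes exactly the inputs where A raises IndexError: a tag array shorter than the sentence.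
def Pre_predict_dict (sentence : String) (predict_tag_array : List Int) : Prop :=
  sentence.toList.length ≤ predict_tag_array.length
instance (sentence : String) (predict_tag_array : List Int) : Decidable (Pre_predict_dict sentence predict_tag_array) := by unfold Pre_predict_dict; infer_instance

def pvWitness_predict_dict : String × List Int := ("aba", [1, 0, 2, 5])

def Spec_predict_dict (sentence : String) (predict_tag_array : List Int) (out : List (Int × List (String × Int))) : Prop := out = predict_dict_alt sentence predict_tag_array
instance (sentence : String) (predict_tag_array : List Int) (out : List (Int × List (String × Int))) : Decidable (Spec_predict_dict sentence predict_tag_array out) := by unfold Spec_predict_dict; infer_instance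

-- ===== CLAIM (what is proved, stated in full; the proofs are below) =====
def Claim_equal_predict_dict : Prop := ∀ (sentence : String) (predict_tag_array : List Int), Dom_predict_dict sentence predict_tag_array → Pre_predict_dict sentence predict_tag_array → Spec_predict_dict sentence predict_tag_array (predict_dict sentence predict_tag_array)

-- ===== LEMMAS AND PROOFS =====

theorem pdGet (ts : List Int) (i : Nat) (h : i < ts.length) :
  PySem.List.pyGet? ts (i:Int) = some (PySem.List.pyGetD ts (i:Int) 0) := by
  simp [PySem.List.pyGet?_natCast, PySem.List.pyGetD_natCast, List.getElem?_eq_getElem h]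

theorem pdCast (i : Nat) : ((i:Int)+1) = (((i+1:Nat)):Int) := by push_cast; ring

theorem pdZ (s : List Char) (ts : List Int) :
  ∀ (m i : Nat) (d : List (Int × List (String × Int))) (st st' : Nat),
    i + (m + 1) = s.length → PySem.List.pyGetD ts (i:Int) 0 = 0 →
    ((List.range' i (m+1)).foldl (pdStep s ts) (d, st)).1
      = ((List.range' i (m+1)).foldl (pdStep s ts) (d, st')).1 := by
  intro m
  induction m with
  | zero =>
    intro i d st st' hlen h0
    have hc : i + 1 = s.length := by omega
    simp [List.range'_succ, pdStep, h0, hc]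
  | succ m ih =>
    intro i d st st' hlen h0
    rw [List.range'_succ, List.foldl_cons, List.foldl_cons]
    by_cases hC : i + 1 = s.length ∨ PySem.List.pyGetD ts ((i:Int)+1) 0 ≠ 0
    · simp [pdStep, h0, hC]
    · push Not at hC
      obtain ⟨h1, h2⟩ := hC
      have hstep : ∀ u : Nat, pdStep s ts (d, u) i = (d, u) := by
        intro u; simp [pdStep, h0, h1, h2]
      rw [hstep, hstep]
      rw [pdCast i] at h2
      exact ih (i+1) d st st' (by omega) h2
theorem pdTake (s : List Char) (st i : Nat) (hst : st ≤ i) (hi : i < s.length) :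
  (s.drop st).take (i - st) ++ [PySem.List.pyGetD s (i:Int) ' '] = (s.drop st).take (i + 1 - st) := by
  have h1 : i + 1 - st = (i - st) + 1 := by omega
  rw [h1, List.take_add_one]
  have h2 : (s.drop st)[i - st]? = some s[i] := by
    rw [List.getElem?_drop]
    have h3 : st + (i - st) = i := by omega
    rw [h3, List.getElem?_eq_getElem hi]
  simp [h2, PySem.List.pyGetD_natCast, hi]

theorem pdSlice (s : List Char) (st i : Nat) :
  PySem.List.slice s (some (st:Int)) (some ((i:Int)+1)) = (s.drop st).take (i + 1 - st) := by
  rw [pdCast i, PySem.List.slice_natCast]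

theorem pdN (s : List Char) (ts : List Int) (hlen : s.length ≤ ts.length) (t : Int) (ht : t ≠ 0) :
  ∀ (m i st : Nat) (tw : List Char) (d : List (Int × List (String × Int))) (fuelI : Nat),
    i + (m + 1) = s.length → st ≤ i → PySem.List.pyGetD ts (i:Int) 0 = t →
    tw = (s.drop st).take (i - st) → m + 2 ≤ fuelI →
    ((List.range' i (m+1)).foldl (pdStep s ts) (d, st)).1
      = ((List.range' (pdInner s ts t fuelI tw i).2 (s.length - (pdInner s ts t fuelI tw i).2)).foldl (pdStep s ts)
          (d ++ [((d.length:Int), [(String.ofList (pdInner s ts t fuelI tw i).1, t)])], (pdInner s ts t fuelI tw i).2)).1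
      ∧ i < (pdInner s ts t fuelI tw i).2 ∧ (pdInner s ts t fuelI tw i).2 ≤ s.length := by
  intro m
  induction m with
  | zero =>
    intro i st tw d fuelI hn hst hti htw hf
    obtain ⟨k, rfl⟩ : ∃ k, fuelI = (k+1)+1 := ⟨fuelI - 2, by omega⟩
    have hi : i < s.length := by omega
    have hi1 : i + 1 = s.length := by omega
    have hne : i ≠ s.length := by omega
    have hg : PySem.List.pyGet? ts (i:Int) = some t := by rw [pdGet ts i (by omega), hti]
    have hinner : pdInner s ts t ((k+1)+1) tw i
        = (tw ++ [PySem.List.pyGetD s (i:Int) ' '], i + 1) := by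
      simp [pdInner, hne, hg, hi1]
    rw [hinner]
    have hw : tw ++ [PySem.List.pyGetD s (i:Int) ' '] = (s.drop st).take (i + 1 - st) := by
      rw [htw]; exact pdTake s st i hst hi
    refine ⟨?_, by omega, by omega⟩
    have hstep : pdStep s ts (d, st) i
        = (d ++ [((d.length:Int), [(String.ofList ((s.drop st).take (i + 1 - st)), t)])], i+1) := by
      have hC : (i + 1 = s.length ∨ PySem.List.pyGetD ts ((i:Int)+1) 0 ≠ t) := Or.inl hi1
      simp [pdStep, hti, hC, ht, pdSlice]
    have h0 : s.length - (i + 1) = 0 := by omega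
    rw [List.range'_succ, List.foldl_cons, hstep, hw, h0]
  | succ m ih =>
    intro i st tw d fuelI hn hst hti htw hf
    obtain ⟨k, rfl⟩ : ∃ k, fuelI = k+1 := ⟨fuelI - 1, by omega⟩
    have hi : i < s.length := by omega
    have hne : i ≠ s.length := by omega
    have hg : PySem.List.pyGet? ts (i:Int) = some t := by rw [pdGet ts i (by omega), hti]
    have hw : tw ++ [PySem.List.pyGetD s (i:Int) ' '] = (s.drop st).take (i + 1 - st) := by
      rw [htw]; exact pdTake s st i hst hi
    have hinner : pdInner s ts t (k+1) tw i
        = pdInner s ts t k (tw ++ [PySem.List.pyGetD s (i:Int) ' ']) (i+1) := by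
      simp [pdInner, hne, hg]
    by_cases ht1 : PySem.List.pyGetD ts ((i+1:Nat):Int) 0 = t
    · -- run continues
      have hIH := ih (i+1) st (tw ++ [PySem.List.pyGetD s (i:Int) ' ']) d k
        (by omega) (by omega) ht1 hw (by omega)
      rw [hinner]
      refine ⟨?_, by omega, hIH.2.2⟩
      rw [List.range'_succ, List.foldl_cons]
      have hstep : pdStep s ts (d, st) i = (d, st) := by
        have : ¬ (i + 1 = s.length ∨ PySem.List.pyGetD ts ((i:Int)+1) 0 ≠ t) := by
          rw [pdCast i]; push Not; exact ⟨by omega, ht1⟩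
        simp only [pdStep, hti]
        rw [if_neg this]
      rw [hstep]
      exact hIH.1
    · -- run ends at i+1
      have hg1 : PySem.List.pyGet? ts ((i+1:Nat):Int) = some (PySem.List.pyGetD ts ((i+1:Nat):Int) 0) :=
        pdGet ts (i+1) (by omega)
      have hinner2 : pdInner s ts t k (tw ++ [PySem.List.pyGetD s (i:Int) ' ']) (i+1)
          = (tw ++ [PySem.List.pyGetD s (i:Int) ' '], i+1) := by
        obtain ⟨k', rfl⟩ : ∃ k', k = k'+1 := ⟨k - 1, by omega⟩
        have hne1 : (i+1) ≠ s.length := by omega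
        have hg1' : PySem.List.pyGet? ts ((i:Int)+1) = some (PySem.List.pyGetD ts ((i:Int)+1) 0) := by
          rw [pdCast i]; exact hg1
        have hne2 : t ≠ PySem.List.pyGetD ts ((i:Int)+1) 0 := by
          rw [pdCast i]; exact Ne.symm ht1
        simp [pdInner, hne1, hg1', hne2]
      rw [hinner, hinner2]
      refine ⟨?_, by omega, by omega⟩
      rw [List.range'_succ, List.foldl_cons]
      have hstep : pdStep s ts (d, st) i
          = (d ++ [((d.length:Int), [(String.ofList ((s.drop st).take (i + 1 - st)), t)])], i+1) := by
        have hC : (i + 1 = s.length ∨ PySem.List.pyGetD ts ((i:Int)+1) 0 ≠ t) := by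
          right; rw [pdCast i]; exact ht1
        simp [pdStep, hti, hC, ht, pdSlice]
      rw [hstep, hw]
      have hm : s.length - (i+1) = m + 1 := by omega
      rw [hm]
theorem pdM (s : List Char) (ts : List Int) (hlen : s.length ≤ ts.length) :
  ∀ (m : Nat), ∀ (i : Nat) (d : List (Int × List (String × Int))) (fuel : Nat),
    i + m = s.length → m < fuel →
    pdOuter s ts fuel d i = ((List.range' i m).foldl (pdStep s ts) (d, i)).1 := by
  intro m
  induction m using Nat.strong_induction_on with
  | _ m IH =>
    intro i d fuel hn hf
    obtain ⟨f, rfl⟩ : ∃ f, fuel = f+1 := ⟨fuel-1, by omega⟩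
    by_cases hi : i = s.length
    · have hm : m = 0 := by omega
      subst hm; simp [pdOuter, hi, List.range']
    · have hiL : i < s.length := by omega
      obtain ⟨m', rfl⟩ : ∃ m', m = m'+1 := ⟨m-1, by omega⟩
      have hg : PySem.List.pyGet? ts (i:Int) = some (PySem.List.pyGetD ts (i:Int) 0) :=
        pdGet ts i (by omega)
      by_cases ht : PySem.List.pyGetD ts (i:Int) 0 = 0
      · have houter : pdOuter s ts (f+1) d i = pdOuter s ts f d (i+1) := by
          simp [pdOuter, hi, hg, ht]
        rw [houter, List.range'_succ, List.foldl_cons]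
        by_cases hC : i + 1 = s.length ∨ PySem.List.pyGetD ts ((i:Int)+1) 0 ≠ PySem.List.pyGetD ts (i:Int) 0
        · have hstep : pdStep s ts (d, i) i = (d, i+1) := by
            rw [ht] at hC
            simp [pdStep, ht]
            tauto
          rw [hstep]
          exact IH m' (by omega) (i+1) d f (by omega) (by omega)
        · push Not at hC
          obtain ⟨h1, h2⟩ := hC
          have hstep : pdStep s ts (d, i) i = (d, i) := by
            simp [pdStep, h1, h2]
          rw [hstep]
          obtain ⟨m'', rfl⟩ : ∃ m'', m' = m''+1 := ⟨m'-1, by omega⟩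
          have h2' : PySem.List.pyGetD ts ((i+1:Nat):Int) 0 = 0 := by
            rw [← pdCast i]; rw [h2, ht]
          rw [pdZ s ts m'' (i+1) d i (i+1) (by omega) h2']
          exact IH (m''+1) (by omega) (i+1) d f (by omega) (by omega)
      · have hN := pdN s ts hlen (PySem.List.pyGetD ts (i:Int) 0) ht m' i i [] d (s.length+1)
          (by omega) (le_refl i) rfl (by simp) (by omega)
        have houter : pdOuter s ts (f+1) d i
            = pdOuter s ts f
                (d ++ [((d.length:Int), [(String.ofList (pdInner s ts (PySem.List.pyGetD ts (i:Int) 0) (s.length+1) [] i).1, PySem.List.pyGetD ts (i:Int) 0)])])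
                (pdInner s ts (PySem.List.pyGetD ts (i:Int) 0) (s.length+1) [] i).2 := by
          simp [pdOuter, hi, hg]
          intro h
          exact absurd h (by simpa using ht)
        rw [houter, hN.1]
        exact IH (s.length - (pdInner s ts (PySem.List.pyGetD ts (i:Int) 0) (s.length+1) [] i).2)
          (by omega) _ _ f (by omega) (by omega)

theorem pdMain (sentence : String) (predict_tag_array : List Int)
    (hpre : sentence.toList.length ≤ predict_tag_array.length) :
    predict_dict sentence predict_tag_array = predict_dict_alt sentence predict_tag_array := by
  unfold predict_dict predict_dict_alt
  rw [List.range_eq_range']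
  exact pdM sentence.toList predict_tag_array hpre sentence.toList.length 0 [] (sentence.toList.length + 1) (by omega) (by omega)

-- ===== VERDICT (by name: the statement is the Claim_ definition above) =====
theorem predict_dict_spec : Claim_equal_predict_dict := by
  intro sentence predict_tag_array _ hpre
  exact pdMain sentence predict_tag_array hpre
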